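-- pv_equiv track=rewrite | github.com/Wako6/Dictionary | dictionary/storage.py | get_fields
-- ===== SOURCE A (Python) =====
-- def get_fields(datas, fields_name):
--     if len(fields_name) < 2:
--         return [r[fields_name[0]] for r in datas]
--
--     result = list()
--     for row in datas:
--         filtred_data = tuple()
--         for label in fields_name:
--             filtred_data += (row[label],)
--         result.append(filtred_data)
--     return result
-- ===== SOURCE B (Python) =====
-- def get_fields(datas, fields_name):
--     if len(fields_name) < 2:
--         return [r[fields_name[0]] for r in datas]
--
--     columns = [[row[label] for row in datas] for label in fields_name]
--     return [tuple(vals) for vals in zip(*columns)]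
-- ===== Notes on version B (the rewrite author's own statement) =====
-- stated objective: alternative
-- what changed: B extracts the data field-major (one column per label) and then transposes the columns with zip(*columns) into per-row tuples, instead of A's row-major double loop accumulating each tuple element by element.
-- outside the precondition, e.g. on get_fields([{'a': '1'}], ['a']): A returns ['1'], B returns ['1']
import Mathlib
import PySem

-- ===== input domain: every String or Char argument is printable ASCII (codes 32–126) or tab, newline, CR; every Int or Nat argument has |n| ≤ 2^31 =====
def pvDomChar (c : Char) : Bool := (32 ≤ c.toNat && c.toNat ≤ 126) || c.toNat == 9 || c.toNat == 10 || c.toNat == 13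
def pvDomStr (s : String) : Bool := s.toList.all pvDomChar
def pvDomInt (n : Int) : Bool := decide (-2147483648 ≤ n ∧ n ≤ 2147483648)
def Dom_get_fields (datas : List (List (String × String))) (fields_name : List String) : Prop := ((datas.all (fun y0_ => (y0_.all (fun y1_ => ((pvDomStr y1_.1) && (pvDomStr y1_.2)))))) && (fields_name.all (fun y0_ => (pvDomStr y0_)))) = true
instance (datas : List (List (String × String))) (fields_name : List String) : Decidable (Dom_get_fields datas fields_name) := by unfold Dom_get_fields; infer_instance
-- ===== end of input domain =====

-- B projects the rows field-major (builds one column per label, then transposes with zip)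
-- instead of A's row-major double loop; return-value equivalence on Pre_ is proved below.

-- ===== PORT A =====
-- row[label] : the row arrives as a Python dict; on Pre_ the key is present, so getD's default is never used
def pyRowGet (row : List (String × String)) (label : String) : String :=
  (PySem.Dict.ofList row).getD label ""

def get_fields (datas : List (List (String × String))) (fields_name : List String) : List (List String) :=
  if fields_name.length < 2 then
    -- this branch is outside Pre_ (Python returns bare strings here, or raises IndexError)
    datas.map (fun r => [pyRowGet r (fields_name.headD "")])
  else
    datas.foldl
      (fun result row =>
        result ++ [fields_name.foldl (fun acc label => acc ++ [pyRowGet row label]) []])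
      []

-- ===== PORT B =====
-- zip(*columns): take heads while every column is nonempty
def zipCols (cols : List (List String)) : List (List String) :=
  if _h : cols ≠ [] ∧ cols.all (fun c => !c.isEmpty) then
    (cols.map (fun c => c.headD "")) :: zipCols (cols.map List.tail)
  else []
termination_by (cols.headD []).length
decreasing_by
  obtain ⟨hne, hall⟩ := _h
  match cols, hne with
  | c :: rest, _ =>
    have hc : c ≠ [] := by
      have := List.all_eq_true.mp hall c (by simp)
      simpa [List.isEmpty_iff] using this
    simp only [List.attach_cons, List.map_cons, List.headD_cons, List.length_tail]
    exact Nat.sub_lt (List.length_pos_of_ne_nil hc) one_pos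

def get_fields_alt (datas : List (List (String × String))) (fields_name : List String) : List (List String) :=
  if fields_name.length < 2 then
    datas.map (fun r => [pyRowGet r (fields_name.headD "")])
  else
    let columns := fields_name.map (fun label => datas.map (fun row => pyRowGet row label))
    zipCols columns

-- ===== PRECONDITION & SPEC =====
-- Pre_ excludes fields_name shorter than 2, where A's comprehension branch returns bare strings
-- (not values of the declared List (List String) type) or raises IndexError on fields_name[0],
-- and inputs where some requested label is missing from some row, where A raises KeyError.
def Pre_get_fields (datas : List (List (String × String))) (fields_name : List String) : Prop :=
  2 ≤ fields_name.length ∧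
    ∀ row ∈ datas, ∀ label ∈ fields_name, (PySem.Dict.ofList row).contains label = true
instance (datas : List (List (String × String))) (fields_name : List String) : Decidable (Pre_get_fields datas fields_name) := by unfold Pre_get_fields; infer_instance

def pvWitness_get_fields : (List (List (String × String))) × List String :=
  ([[("a", "1"), ("b", "2")], [("a", "3"), ("b", "4")]], ["b", "a"])

def Spec_get_fields (datas : List (List (String × String))) (fields_name : List String) (out : List (List String)) : Prop := out = get_fields_alt datas fields_name
instance (datas : List (List (String × String))) (fields_name : List String) (out : List (List String)) : Decidable (Spec_get_fields datas fields_name out) := by unfold Spec_get_fields; infer_instance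

-- ===== CLAIM (what is proved, stated in full; the proofs are below) =====
def Claim_equal_get_fields : Prop := ∀ (datas : List (List (String × String))) (fields_name : List String), Dom_get_fields datas fields_name → Pre_get_fields datas fields_name → Spec_get_fields datas fields_name (get_fields datas fields_name)

-- ===== LEMMAS AND PROOFS =====

-- transposing the columns gives back the rows (fields nonempty)
theorem zipCols_map_map (fields : List String) (hf : fields ≠ [])
    (g : List (String × String) → String → String) :
    ∀ (datas : List (List (String × String))),
      zipCols (fields.map (fun label => datas.map (fun row => g row label)))
        = datas.map (fun row => fields.map (fun label => g row label)) := by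
  obtain ⟨f, rest, rfl⟩ := List.exists_cons_of_ne_nil hf
  intro datas
  induction datas with
  | nil =>
    rw [zipCols]
    simp
  | cons r ds ih =>
    rw [zipCols, dif_pos (by simp)]
    simp only [List.map_map, Function.comp_def, List.map_cons, List.headD_cons, List.tail_cons]
    rw [show (List.map (fun row => g row f) ds :: List.map (fun x => List.map (fun row => g row x) ds) rest)
        = (f :: rest).map (fun label => ds.map (fun row => g row label)) by simp, ih]
    simp

-- ===== VERDICT (by name: the statement is the Claim_ definition above) =====
theorem get_fields_spec : Claim_equal_get_fields := by
  intro datas fields_name _ hpre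
  unfold Spec_get_fields get_fields get_fields_alt
  obtain ⟨hlen, _⟩ := hpre
  have hne : ¬ fields_name.length < 2 := by omega
  rw [if_neg hne, if_neg hne]
  have hf : fields_name ≠ [] := by
    intro h; subst h; simp at hlen
  rw [zipCols_map_map fields_name hf pyRowGet datas]
  simp only [PySem.List.foldl_append_singleton_eq_map, List.nil_append]
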